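-- pv_equiv track=rewrite | github.com/floceans/Madininair_2024 | DATA_CONCENTRATION/marées/data_marees.py | filter_dates_by_value
-- ===== SOURCE A (Python) =====
-- def filter_dates_by_value(data, lower_bound, upper_bound):
--     filtered_dates = []
--     k = 0
--     for entry in data:
--         date, value, _ = entry
--         if (value < lower_bound) and (k%60 == 0):
--             filtered_dates.append(date)
--         k += 1
--     return filtered_dates
-- ===== SOURCE B (Python) =====
-- def filter_dates_by_value(data, lower_bound, upper_bound):
--     selected = data[::60]
--     return [date for date, value, _ in selected if value < lower_bound]
-- ===== Notes on version B (the rewrite author's own statement) =====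
-- stated objective: simpler
-- what changed: B first selects the stride-60 subsequence (data[::60]) and then filters it by value, instead of scanning every row while maintaining a k%60 counter.
import Mathlib
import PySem

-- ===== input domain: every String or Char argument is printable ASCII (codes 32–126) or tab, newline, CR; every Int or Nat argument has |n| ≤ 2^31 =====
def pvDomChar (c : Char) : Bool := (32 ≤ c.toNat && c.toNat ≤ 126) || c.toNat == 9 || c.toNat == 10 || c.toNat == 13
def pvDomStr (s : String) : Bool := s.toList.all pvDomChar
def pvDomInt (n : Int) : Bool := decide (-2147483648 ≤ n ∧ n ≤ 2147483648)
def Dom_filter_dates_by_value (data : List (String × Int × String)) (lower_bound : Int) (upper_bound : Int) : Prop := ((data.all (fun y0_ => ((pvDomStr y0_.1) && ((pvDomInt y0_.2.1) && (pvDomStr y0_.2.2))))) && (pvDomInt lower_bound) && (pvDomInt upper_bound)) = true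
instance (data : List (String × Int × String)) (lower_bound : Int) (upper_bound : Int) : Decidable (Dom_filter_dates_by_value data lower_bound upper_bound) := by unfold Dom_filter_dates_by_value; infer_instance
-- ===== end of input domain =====

-- B selects the stride-60 subsequence first (data[::60]) and then filters it by value,
-- replacing A's scan of every row with a k%60 counter. Objective: simpler.

-- ===== PORT A =====
-- the for-loop of A with its state (filtered_dates, k)
def fdbvLoop (lower_bound : Int) : List (String × Int × String) → List String → Int → List String
  | [], acc, _ => acc
  | e :: rest, acc, k =>
      fdbvLoop lower_bound rest
        (if e.2.1 < lower_bound ∧ PySem.Int.mod k 60 = 0 then acc ++ [e.1] else acc) (k + 1)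

def filter_dates_by_value (data : List (String × Int × String)) (lower_bound : Int) (upper_bound : Int) : List String :=
  fdbvLoop lower_bound data [] 0

-- ===== PORT B =====
-- data[::60] : every 60th element starting at index 0
def fdbvEvery60 : List (String × Int × String) → List (String × Int × String)
  | [] => []
  | e :: rest => e :: fdbvEvery60 (rest.drop 59)
termination_by l => l.length
decreasing_by simp [List.length_drop]

def filter_dates_by_value_alt (data : List (String × Int × String)) (lower_bound : Int) (upper_bound : Int) : List String :=
  ((fdbvEvery60 data).filter (fun e => decide (e.2.1 < lower_bound))).map (fun e => e.1)

-- ===== PRECONDITION & SPEC =====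
def Spec_filter_dates_by_value (data : List (String × Int × String)) (lower_bound : Int) (upper_bound : Int) (out : List String) : Prop := out = filter_dates_by_value_alt data lower_bound upper_bound
instance (data : List (String × Int × String)) (lower_bound : Int) (upper_bound : Int) (out : List String) : Decidable (Spec_filter_dates_by_value data lower_bound upper_bound out) := by unfold Spec_filter_dates_by_value; infer_instance

-- ===== CLAIM (what is proved, stated in full; the proofs are below) =====
def Claim_equal_filter_dates_by_value : Prop := ∀ (data : List (String × Int × String)) (lower_bound : Int) (upper_bound : Int), Dom_filter_dates_by_value data lower_bound upper_bound → Spec_filter_dates_by_value data lower_bound upper_bound (filter_dates_by_value data lower_bound upper_bound)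

-- ===== LEMMAS AND PROOFS =====

-- the accumulator is only appended to
theorem fdbvLoop_acc (lb : Int) (data : List (String × Int × String)) (acc : List String) (k : Int) :
    fdbvLoop lb data acc k = acc ++ fdbvLoop lb data [] k := by
  induction data generalizing acc k with
  | nil => simp [fdbvLoop]
  | cons e rest ih =>
    simp only [fdbvLoop]
    split_ifs with h
    · simp only [List.nil_append]
      rw [ih (acc ++ [e.1]), ih [e.1]]
      simp
    · rw [ih acc]

-- fdbvEvery60 on nil and cons (equation lemmas of the well-founded definition)
theorem fdbvEvery60_nil : fdbvEvery60 [] = [] := by rw [fdbvEvery60.eq_def]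

theorem fdbvEvery60_cons (e : String × Int × String) (rest : List (String × Int × String)) :
    fdbvEvery60 (e :: rest) = e :: fdbvEvery60 (rest.drop 59) := by rw [fdbvEvery60.eq_def]

-- loop invariant: with counter k ≥ 0, the loop computes B's filter over the stride
-- starting at the next index ≡ 0 (mod 60)
theorem fdbvLoop_eq (lb : Int) (data : List (String × Int × String)) (k : Int) (hk : 0 ≤ k) :
    fdbvLoop lb data [] k
      = ((fdbvEvery60 (data.drop ((60 - k % 60) % 60).toNat)).filter
          (fun x => decide (x.2.1 < lb))).map (fun x => x.1) := by
  induction data generalizing k with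
  | nil => simp [fdbvLoop, fdbvEvery60_nil]
  | cons e rest ih =>
    have hmod : PySem.Int.mod k 60 = k % 60 := PySem.Int.mod_eq_emod_of_pos (by norm_num)
    by_cases h0 : k % 60 = 0
    · have hd : ((60 - k % 60) % 60).toNat = 0 := by omega
      have h1 : ((60 - (k + 1) % 60) % 60).toNat = 59 := by omega
      rw [hd]
      simp only [List.drop_zero]
      rw [fdbvEvery60_cons]
      by_cases hv : e.2.1 < lb
      · have hc : e.2.1 < lb ∧ PySem.Int.mod k 60 = 0 := ⟨hv, by rw [hmod, h0]⟩
        simp only [fdbvLoop, if_pos hc, List.nil_append]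
        rw [fdbvLoop_acc, ih (k + 1) (by omega), h1]
        simp [hv]
      · have hc : ¬(e.2.1 < lb ∧ PySem.Int.mod k 60 = 0) := fun hcc => hv hcc.1
        simp only [fdbvLoop, if_neg hc]
        rw [ih (k + 1) (by omega), h1]
        simp [hv]
    · have hc : ¬(e.2.1 < lb ∧ PySem.Int.mod k 60 = 0) := fun hcc => h0 (hmod ▸ hcc.2)
      have hd : ((60 - k % 60) % 60).toNat = (60 - k % 60).toNat := by omega
      have hpos : 1 ≤ (60 - k % 60).toNat := by omega
      rw [hd]
      simp only [fdbvLoop, if_neg hc]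
      rw [ih (k + 1) (by omega)]
      have hdropcons : (e :: rest).drop (60 - k % 60).toNat
          = rest.drop ((60 - k % 60).toNat - 1) := by
        obtain ⟨m, hm⟩ : ∃ m, (60 - k % 60).toNat = m + 1 := ⟨_, (Nat.succ_pred_eq_of_pos hpos).symm⟩
        rw [hm]; simp
      rw [hdropcons]
      by_cases h59 : k % 60 = 59
      · have e1 : ((60 - (k + 1) % 60) % 60).toNat = 0 := by omega
        have e2 : (60 - k % 60).toNat - 1 = 0 := by omega
        rw [e1, e2]
      · have e1 : ((60 - (k + 1) % 60) % 60).toNat = (60 - k % 60).toNat - 1 := by omega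
        rw [e1]

-- ===== VERDICT (by name: the statement is the Claim_ definition above) =====
theorem filter_dates_by_value_spec : Claim_equal_filter_dates_by_value := by
  intro data lb ub _
  unfold Spec_filter_dates_by_value filter_dates_by_value filter_dates_by_value_alt
  rw [fdbvLoop_eq lb data 0 le_rfl]
  norm_num
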